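-- pv_equiv track=rewrite | github.com/aliyahyaaamir/practice | microsoft/min_swaps_to_group_red_balls.py | min_swaps_to_group_red_balls
-- ===== SOURCE A (Python) =====
-- def min_swaps_to_group_red_balls(S: str) -> int:
--     stack = []
--
--     seen_red = False
--     at_least_two_reds = 0
--     for ball in S:
--         if seen_red and ball == 'W':
--             stack.append(ball)
--         if not seen_red and ball == 'R':
--             seen_red = True
--         if ball == 'R':
--             at_least_two_reds += 1
--
--     return len(stack) if at_least_two_reds == 2 else -1
-- ===== SOURCE B (Python) =====
-- def min_swaps_to_group_red_balls(S: str) -> int: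
--     reds = [i for i, c in enumerate(S) if c == 'R']
--     if len(reds) != 2:
--         return -1
--     return S[reds[0] + 1:].count('W')
-- ===== Notes on version B (the rewrite author's own statement) =====
-- stated objective: simpler
-- what changed: B collects the indices of all 'R' characters up front, returns -1 unless there are exactly two, and otherwise counts 'W' in the slice after the first 'R' -- replacing A's single pass that maintains seen_red/at_least_two_reds flags and appends whites to a stack.
import Mathlib
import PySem

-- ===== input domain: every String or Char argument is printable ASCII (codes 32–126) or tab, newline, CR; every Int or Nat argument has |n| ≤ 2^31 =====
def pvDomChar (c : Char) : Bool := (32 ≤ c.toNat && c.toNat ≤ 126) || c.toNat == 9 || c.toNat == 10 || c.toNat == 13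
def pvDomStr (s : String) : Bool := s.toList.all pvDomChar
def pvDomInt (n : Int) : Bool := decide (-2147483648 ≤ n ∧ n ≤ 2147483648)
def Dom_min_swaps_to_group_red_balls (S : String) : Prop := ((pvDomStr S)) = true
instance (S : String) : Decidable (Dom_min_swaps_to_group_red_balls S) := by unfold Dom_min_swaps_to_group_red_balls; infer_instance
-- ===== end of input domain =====

-- B replaces A's one-pass flag-and-stack scan by collecting all 'R' indices first and
-- counting 'W' in the slice after the first red (objective: simpler).

-- ===== PORT A =====
-- the body of A's for-loop, on state (stack, seen_red, at_least_two_reds)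
def pvStepA (st : List Char × Bool × Int) (ball : Char) : List Char × Bool × Int :=
  let st1 := if st.2.1 && (ball == 'W') then (st.1 ++ [ball], st.2.1, st.2.2) else st
  let st2 := if (!st1.2.1) && (ball == 'R') then (st1.1, true, st1.2.2) else st1
  if ball == 'R' then (st2.1, st2.2.1, st2.2.2 + 1) else st2

def min_swaps_to_group_red_balls (S : String) : Int :=
  let r := S.toList.foldl pvStepA ([], false, 0)
  if r.2.2 == 2 then (r.1.length : Int) else -1

-- ===== PORT B =====
def min_swaps_to_group_red_balls_alt (S : String) : Int :=
  let reds := (PySem.List.enumerate S.toList 0).filterMap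
      (fun p => if p.2 == 'R' then some p.1 else none)
  if reds.length ≠ 2 then -1
  else
    match reds with
    | i :: _ => (PySem.Str.count (PySem.Str.slice S (some (i + 1)) none) "W" : Int)
    | [] => -1  -- unreachable: reds.length = 2

-- ===== PRECONDITION & SPEC =====
def Spec_min_swaps_to_group_red_balls (S : String) (out : Int) : Prop := out = min_swaps_to_group_red_balls_alt S
instance (S : String) (out : Int) : Decidable (Spec_min_swaps_to_group_red_balls S out) := by unfold Spec_min_swaps_to_group_red_balls; infer_instance

-- ===== CLAIM (what is proved, stated in full; the proofs are below) =====
def Claim_equal_min_swaps_to_group_red_balls : Prop := ∀ (S : String), Dom_min_swaps_to_group_red_balls S → Spec_min_swaps_to_group_red_balls S (min_swaps_to_group_red_balls S)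

-- ===== LEMMAS AND PROOFS =====

-- A's loop once seen_red is set: every later 'W' is pushed, every later 'R' is counted
lemma pvSeenA (l : List Char) : ∀ (st : List Char) (c : Int),
    l.foldl pvStepA (st, true, c) = (st ++ l.filter (· == 'W'), true, c + (l.count 'R' : Int)) := by
  induction l with
  | nil => simp
  | cons b t ih =>
    intro st c
    by_cases hW : b = 'W'
    · subst hW
      simp [List.foldl_cons, pvStepA, ih]
    · by_cases hR : b = 'R'
      · subst hR
        simp [List.foldl_cons, pvStepA, ih]
        ring
      · simp [List.foldl_cons, pvStepA, hW, hR, ih]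

-- A's loop before any red: nothing happens
lemma pvNoRA (l : List Char) (h : 'R' ∉ l) : ∀ (st : List Char) (c : Int),
    l.foldl pvStepA (st, false, c) = (st, false, c) := by
  induction l with
  | nil => simp
  | cons b t ih =>
    intro st c
    have hb : b ≠ 'R' := fun hb => h (hb ▸ List.mem_cons_self ..)
    have ht : 'R' ∉ t := fun ht => h (List.mem_cons_of_mem _ ht)
    by_cases hW : b = 'W'
    · subst hW; simp [List.foldl_cons, pvStepA, ih ht]
    · simp [List.foldl_cons, pvStepA, hb, ih ht]

-- B's comprehension yields nothing on a red-free segment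
lemma pvRedsNil (l : List Char) (h : 'R' ∉ l) : ∀ (s : Int),
    (PySem.List.enumerate l s).filterMap (fun p => if p.2 == 'R' then some p.1 else none) = [] := by
  induction l with
  | nil => simp [PySem.List.enumerate_nil]
  | cons b t ih =>
    intro s
    have hb : b ≠ 'R' := fun hb => h (hb ▸ List.mem_cons_self ..)
    have ht : 'R' ∉ t := fun ht => h (List.mem_cons_of_mem _ ht)
    rw [PySem.List.enumerate_cons, List.filterMap_cons_none (by simp [hb])]
    exact ih ht (s + 1)

-- B's comprehension has one entry per 'R'
lemma pvRedsLen (l : List Char) : ∀ (s : Int),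
    ((PySem.List.enumerate l s).filterMap (fun p => if p.2 == 'R' then some p.1 else none)).length
      = l.count 'R' := by
  induction l with
  | nil => simp [PySem.List.enumerate_nil]
  | cons b t ih =>
    intro s
    by_cases hb : b = 'R'
    · subst hb
      rw [PySem.List.enumerate_cons]
      have hstep : List.filterMap (fun (p : Int × Char) => if p.2 == 'R' then some p.1 else none)
          ((s, 'R') :: PySem.List.enumerate t (s + 1))
          = s :: List.filterMap (fun (p : Int × Char) => if p.2 == 'R' then some p.1 else none)
              (PySem.List.enumerate t (s + 1)) := by
        rw [List.filterMap_cons]; simp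
      rw [hstep, List.length_cons, ih (s + 1)]
      simp
    · rw [PySem.List.enumerate_cons, List.filterMap_cons_none (by simp [hb]), ih (s + 1)]
      simp [hb]

-- split a list at its first 'R'
lemma pvFirstSplit (l : List Char) (h : 'R' ∈ l) :
    ∃ t r, l = t ++ 'R' :: r ∧ 'R' ∉ t := by
  induction l with
  | nil => cases h
  | cons b cs ih =>
    by_cases hb : b = 'R'
    · exact ⟨[], cs, by simp [hb], by simp⟩
    · rcases List.mem_cons.mp h with h1 | h2
      · exact absurd h1.symm hb
      · obtain ⟨t, r, hl, ht⟩ := ih h2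
        refine ⟨b :: t, r, by simp [hl], ?_⟩
        intro hm
        rcases List.mem_cons.mp hm with e | e
        · exact hb e.symm
        · exact ht e

-- counting the single-character substring 'W' is counting the character
lemma pvCountWgo (t : List Char) : ∀ (acc : Nat),
    PySem.Chars.count.go ['W'] t.length t acc = acc + t.count 'W' := by
  induction t with
  | nil => intro acc; rfl
  | cons c t ih =>
    intro acc
    show PySem.Chars.count.go ['W'] (t.length + 1) (c :: t) acc = _
    by_cases hc : c = 'W'
    · subst hc
      simp [PySem.Chars.count.go, List.isPrefixOf, ih]
      omega
    · simp [PySem.Chars.count.go, List.isPrefixOf, hc, ih]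
      exact fun e => hc e.symm

lemma pvCountW (cs : List Char) : PySem.Chars.count cs ['W'] = cs.count 'W' := by
  simp [PySem.Chars.count, pvCountWgo]

-- ===== VERDICT (by name: the statement is the Claim_ definition above) =====
theorem min_swaps_to_group_red_balls_spec : Claim_equal_min_swaps_to_group_red_balls := by
  intro S _
  unfold Spec_min_swaps_to_group_red_balls min_swaps_to_group_red_balls min_swaps_to_group_red_balls_alt
  by_cases hR : 'R' ∈ S.toList
  · obtain ⟨t, r, hl, ht⟩ := pvFirstSplit S.toList hR
    have hct : t.count 'R' = 0 := List.count_eq_zero_of_not_mem ht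
    -- A's fold over t ++ 'R' :: r
    have hA : S.toList.foldl pvStepA ([], false, 0)
        = (r.filter (· == 'W'), true, 1 + (r.count 'R' : Int)) := by
      rw [hl, List.foldl_append, pvNoRA t ht, List.foldl_cons]
      have hstep : pvStepA ([], false, 0) 'R' = ([], true, 1) := by decide
      rw [hstep, pvSeenA]
      simp
    -- B's reds list over t ++ 'R' :: r
    have hB : (PySem.List.enumerate S.toList 0).filterMap
        (fun p => if p.2 == 'R' then some p.1 else none)
        = ((t.length : Int)) :: (PySem.List.enumerate r ((t.length : Int) + 1)).filterMap
            (fun p => if p.2 == 'R' then some p.1 else none) := by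
      rw [hl, PySem.List.enumerate_append, List.filterMap_append, pvRedsNil t ht,
        PySem.List.enumerate_cons]
      simp
    have hlen : ((PySem.List.enumerate S.toList 0).filterMap
        (fun p => if p.2 == 'R' then some p.1 else none)).length = 1 + r.count 'R' := by
      rw [pvRedsLen]; rw [hl]; simp [List.count_append, hct]; omega
    rw [hA, hB]
    by_cases hc : r.count 'R' = 1
    · -- exactly two reds: both return the W-count after the first red
      have hcond : (1 + (r.count 'R' : Int) == 2) = true := by
        simp [hc]
      have hlen2 : ¬ (((t.length : Int)) :: (PySem.List.enumerate r ((t.length : Int) + 1)).filterMap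
          (fun p => if p.2 == 'R' then some p.1 else none)).length ≠ 2 := by
        have := hlen; rw [hB] at this; omega
      simp only [hcond, if_true, hlen2, if_false]
      have hslice : (PySem.Str.slice S (some ((t.length : Int) + 1)) none).toList = r := by
        rw [PySem.Str.toList_slice, PySem.Chars.slice_eq_listSlice]
        have h1 : ((t.length : Int) + 1) = ((t.length + 1 : Nat) : Int) := by push_cast; ring
        rw [h1, PySem.List.slice_from_natCast, hl]
        have h2 : t ++ 'R' :: r = (t ++ ['R']) ++ r := by simp
        rw [h2, show t.length + 1 = (t ++ ['R']).length by simp, List.drop_left]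
      rw [PySem.Str.count_eq, hslice]
      have : ("W" : String).toList = ['W'] := by decide
      rw [this, pvCountW]
      simp [List.count_eq_countP, List.countP_eq_length_filter]
    · -- not exactly two reds: both return -1
      have hcond : (1 + (r.count 'R' : Int) == 2) = false := by
        simp; omega
      have hlen2 : (((t.length : Int)) :: (PySem.List.enumerate r ((t.length : Int) + 1)).filterMap
          (fun p => if p.2 == 'R' then some p.1 else none)).length ≠ 2 := by
        have := hlen; rw [hB] at this; omega
      rw [if_neg (show ¬((1 + (List.count 'R' r : Int) == 2) = true) by simp [hcond]),
        if_pos hlen2]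
  · -- no red at all: A keeps count 0, B's reds is empty; both -1
    rw [pvNoRA S.toList hR, pvRedsNil S.toList hR]
    simp
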